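-- pv_equiv track=rewrite | github.com/gusmezomo/compression-and-encryption | logic/fibonacci.py | _fibonacci_decode
-- ===== SOURCE A (Python) =====
-- def _fibonacci_decode(codeword: str) -> int: #convert codeword to decimal
--     bits = codeword[:-1]
--     N = len(bits)
--
--     fibs = [1,2]
--     while len(fibs) < N:
--         nxt = fibs[-1] + fibs[-2]
--         fibs.append(nxt)
--
--     total = 0
--     for i, bit in enumerate(bits):
--         if bit == '1':
--             total += fibs[i]
--
--     return total
-- ===== SOURCE B (Python) =====
-- def _fibonacci_decode(codeword: str) -> int: #convert codeword to decimal
--     # Right-to-left Horner scheme on the Fibonacci recurrence: no Fibonacci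
--     # number is ever computed. Invariant: the value of the suffix already
--     # processed, read as starting at position i, equals u*F(i) + v*F(i+1)
--     # (F(0)=1, F(1)=2). Stepping one bit left: u, v = bit + v, u + v.
--     u = v = 0
--     for bit in reversed(codeword[:-1]):
--         u, v = (1 if bit == '1' else 0) + v, u + v
--     return u + 2 * v
-- ===== Notes on version B (the rewrite author's own statement) =====
-- stated objective: faster
-- what changed: Replaced the forward pass with a precomputed Fibonacci table by a right-to-left Horner-style scheme that never computes any Fibonacci number: it folds the bits from the end keeping two coefficients (u, v) with invariant suffix-value = u*F(i) + v*F(i+1), stepping u, v = bit + v, u + v, and returns u + 2*v.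
import Mathlib
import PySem

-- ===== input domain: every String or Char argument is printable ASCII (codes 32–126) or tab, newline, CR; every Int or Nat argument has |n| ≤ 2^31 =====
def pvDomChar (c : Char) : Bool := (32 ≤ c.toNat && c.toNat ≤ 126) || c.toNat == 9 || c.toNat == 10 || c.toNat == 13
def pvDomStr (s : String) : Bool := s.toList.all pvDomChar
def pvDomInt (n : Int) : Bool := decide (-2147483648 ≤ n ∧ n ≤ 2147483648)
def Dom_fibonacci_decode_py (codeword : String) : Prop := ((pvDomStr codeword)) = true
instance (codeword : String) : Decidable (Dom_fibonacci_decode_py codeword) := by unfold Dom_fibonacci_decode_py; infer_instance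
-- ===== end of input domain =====

-- B replaces A's Fibonacci-table-then-sum passes by a right-to-left Horner scheme on the
-- Fibonacci recurrence that keeps two coefficients and never computes a Fibonacci number.

-- ===== PORT A =====
-- while len(fibs) < N: fibs.append(fibs[-1] + fibs[-2])
def fibBuild (fibs : List Int) (N : Nat) : List Int :=
  if _h : fibs.length < N then
    fibBuild (fibs ++ [PySem.List.pyGetD fibs (-1) 0 + PySem.List.pyGetD fibs (-2) 0]) N
  else fibs
termination_by N - fibs.length

-- for i, bit in enumerate(bits): if bit == '1': total += fibs[i]
def loopA (fibs : List Int) : List Char → Int → Int → Int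
  | [], _, total => total
  | c :: rest, i, total =>
      loopA fibs rest (i + 1) (if c == '1' then total + PySem.List.pyGetD fibs i 0 else total)

def fibonacci_decode_py (codeword : String) : Int :=
  let bits := PySem.List.slice codeword.toList none (some (-1))
  let fibs := fibBuild [1, 2] bits.length
  loopA fibs bits 0 0

-- ===== PORT B =====
-- for bit in reversed(bits): u, v = (1 if bit == '1' else 0) + v, u + v; return u + 2*v
def goB : List Char → Int → Int → Int
  | [], u, v => u + 2 * v
  | c :: rest, u, v => goB rest ((if c == '1' then 1 else 0) + v) (u + v)

def fibonacci_decode_py_alt (codeword : String) : Int :=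
  goB (PySem.List.slice codeword.toList none (some (-1))).reverse 0 0

-- ===== PRECONDITION & SPEC =====
def Spec_fibonacci_decode_py (codeword : String) (out : Int) : Prop := out = fibonacci_decode_py_alt codeword
instance (codeword : String) (out : Int) : Decidable (Spec_fibonacci_decode_py codeword out) := by unfold Spec_fibonacci_decode_py; infer_instance

-- ===== CLAIM (what is proved, stated in full; the proofs are below) =====
def Claim_equal_fibonacci_decode_py : Prop := ∀ (codeword : String), Dom_fibonacci_decode_py codeword → Spec_fibonacci_decode_py codeword (fibonacci_decode_py codeword)

-- ===== LEMMAS AND PROOFS =====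
def fib : Nat → Int
  | 0 => 1
  | 1 => 2
  | n + 2 => fib n + fib (n + 1)

-- the intended decoding sum, starting at Fibonacci index k
def S : List Char → Nat → Int
  | [], _ => 0
  | c :: r, k => (if c == '1' then fib k else 0) + S r (k + 1)

theorem range_map_fib_succ (m : Nat) (hm : 2 ≤ m) :
    (List.range m).map fib ++
      [PySem.List.pyGetD ((List.range m).map fib) (-1) 0 +
       PySem.List.pyGetD ((List.range m).map fib) (-2) 0] =
    (List.range (m + 1)).map fib := by
  obtain ⟨k, rfl⟩ : ∃ k, m = k + 2 := ⟨m - 2, by omega⟩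
  have hne : ((List.range (k + 2)).map fib) ≠ [] := by simp
  rw [PySem.List.pyGetD_neg_one _ _ hne,
      PySem.List.pyGetD_neg_ofNat _ 2 0 (by omega) (by simp)]
  rw [List.getLast_eq_getElem]
  simp [List.range_succ, fib]
  ring

theorem fibBuild_eq (m N : Nat) (hm : 2 ≤ m) :
    fibBuild ((List.range m).map fib) N = (List.range (max m N)).map fib := by
  rw [fibBuild]
  by_cases h : m < N
  · rw [dif_pos (by simpa using h), range_map_fib_succ m hm,
        fibBuild_eq (m + 1) N (by omega)]
    have : max (m + 1) N = max m N := by omega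
    rw [this]
  · rw [dif_neg (by simpa using h)]
    have : max m N = m := by omega
    rw [this]
termination_by N - m

theorem loopA_eq (M : Nat) (bits : List Char) : ∀ (j : Nat) (t : Int), j + bits.length ≤ M →
    loopA ((List.range M).map fib) bits (j : Int) t = t + S bits j := by
  induction bits with
  | nil => intro j t _; simp [loopA, S]
  | cons c r ih =>
    intro j t h
    have hget : PySem.List.pyGetD ((List.range M).map fib) (j : Int) 0 = fib j := by
      have hj : j < M := by simp at h; omega
      rw [PySem.List.pyGetD_natCast]
      simp [hj]
    have hcast : ((j : Int) + 1) = ((j + 1 : Nat) : Int) := by push_cast; ring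
    rw [loopA, hget, hcast, ih (j + 1) _ (by simp at h ⊢; omega)]
    simp only [S]
    split_ifs <;> ring

-- S over a suffix extended on the left by one bit
theorem S_cons (c : Char) (l : List Char) (k : Nat) :
    S (c :: l) k = (if c == '1' then fib k else 0) + S l (k + 1) := rfl

-- invariant of B's right-to-left fold: if (u, v) encodes S tail, the result is S (rl.reverse ++ tail) 0
theorem goB_eq (rl : List Char) : ∀ (u v : Int) (tail : List Char),
    (∀ k, u * fib k + v * fib (k + 1) = S tail k) →
    goB rl u v = S (rl.reverse ++ tail) 0 := by
  induction rl with
  | nil =>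
    intro u v tail h
    simp only [goB, List.reverse_nil, List.nil_append]
    have h0 := h 0
    simp [fib] at h0
    linarith
  | cons c rest ih =>
    intro u v tail h
    rw [goB, ih _ _ (c :: tail) ?_, List.reverse_cons, List.append_assoc]
    · rfl
    · intro k
      have hf : fib (k + 1 + 1) = fib k + fib (k + 1) := by rw [fib]
      rw [S_cons, ← h (k + 1)]
      split_ifs <;> rw [hf] <;> ring

theorem base_table : ([1, 2] : List Int) = (List.range 2).map fib := by decide

-- ===== VERDICT (by name: the statement is the Claim_ definition above) =====
theorem fibonacci_decode_py_spec : Claim_equal_fibonacci_decode_py := by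
  intro codeword _
  unfold Spec_fibonacci_decode_py fibonacci_decode_py fibonacci_decode_py_alt
  set bits := PySem.List.slice codeword.toList none (some (-1)) with hbits
  show loopA (fibBuild [1, 2] bits.length) bits 0 0 = goB bits.reverse 0 0
  rw [base_table, fibBuild_eq 2 bits.length (by omega)]
  have hA : loopA ((List.range (max 2 bits.length)).map fib) bits ((0 : Nat) : Int) 0
      = 0 + S bits 0 := loopA_eq _ bits 0 0 (by omega)
  have hB : goB bits.reverse 0 0 = S (bits.reverse.reverse ++ []) 0 :=
    goB_eq bits.reverse 0 0 [] (by intro k; induction k <;> simp [S])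
  simp only [List.reverse_reverse, List.append_nil] at hB
  rw [hB]
  simpa using hA
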